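-- pv_equiv track=rewrite | github.com/thomas-westfall/assignments-12700 | 08/ladybug.py | check
-- ===== SOURCE A (Python) =====
-- def check(n,b):
--     for x in b:
--
--         if b.count(x) == 1 and x != "_":
--             return "NO"
--
--     for i in range(1,n-1):
--         if (b.count("_") == 0) and ((b[i] != b[i-1]) and (b[i] != b[i+1])):
--             return "NO"
--
--     return "YES"
-- ===== SOURCE B (Python) =====
-- def check(n, b):
--     s = sorted(b)
--     m = len(s)
--     for j in range(m):
--         if (j == 0 or s[j - 1] != s[j]) and (j == m - 1 or s[j + 1] != s[j]) and s[j] != "_":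
--             return "NO"
--     if "_" not in b:
--         for i in range(1, n - 1):
--             if b[i] != b[i - 1] and b[i] != b[i + 1]:
--                 return "NO"
--     return "YES"
-- ===== Notes on version B (the rewrite author's own statement) =====
-- stated objective: faster
-- what changed: B detects lonely characters by sorting the board and scanning the sorted copy once for an element whose sorted neighbours both differ (equal elements are adjacent after sorting), instead of A's repeated b.count scan per character; the underscore membership test is hoisted out of the neighbour loop.
import Mathlib
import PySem

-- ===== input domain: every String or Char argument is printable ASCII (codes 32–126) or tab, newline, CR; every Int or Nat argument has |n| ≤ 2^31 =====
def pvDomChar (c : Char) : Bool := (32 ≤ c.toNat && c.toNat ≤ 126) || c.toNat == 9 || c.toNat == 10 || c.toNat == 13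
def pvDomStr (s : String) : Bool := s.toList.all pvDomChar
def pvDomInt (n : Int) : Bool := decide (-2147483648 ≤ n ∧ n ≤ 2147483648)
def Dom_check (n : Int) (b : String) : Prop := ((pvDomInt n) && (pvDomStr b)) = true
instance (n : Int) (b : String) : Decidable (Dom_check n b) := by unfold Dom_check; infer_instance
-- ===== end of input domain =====

-- B finds lonely (count-1) non-'_' characters by sorting the board and scanning the sorted copy
-- once for an element differing from both sorted neighbours (O(n^2) → O(n log n)); return value only,
-- neither version mutates its arguments.

-- ===== PORT A =====
-- 'for x in b: if b.count(x) == 1 and x != "_": return "NO"'  (x is a single char, so str.count = char count)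
def checkLoop1 (full : List Char) : List Char → Option String
  | [] => none
  | x :: rest => if full.count x = 1 ∧ x ≠ '_' then some "NO" else checkLoop1 full rest

-- 'for i in range(1, n-1): if b.count("_") == 0 and b[i] != b[i-1] and b[i] != b[i+1]: return "NO"'
-- b[i] is pyGet?; the '.getD ' '' default is never consulted inside Pre_check (Python raises IndexError there).
def checkLoop2 (full : List Char) : List Int → String
  | [] => "YES"
  | i :: rest =>
    if full.count '_' = 0 ∧
       ((PySem.List.pyGet? full i).getD ' ' ≠ (PySem.List.pyGet? full (i - 1)).getD ' ' ∧
        (PySem.List.pyGet? full i).getD ' ' ≠ (PySem.List.pyGet? full (i + 1)).getD ' ') then "NO"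
    else checkLoop2 full rest

def check (n : Int) (b : String) : String :=
  match checkLoop1 b.toList b.toList with
  | some s => s
  | none => checkLoop2 b.toList (PySem.List.pyRange 1 (n - 1) 1)

-- ===== PORT B =====
-- 'for j in range(m): if (j == 0 or s[j-1] != s[j]) and (j == m-1 or s[j+1] != s[j]) and s[j] != "_": return "NO"'
-- (s is sorted, so an element differing from both sorted neighbours occurs exactly once)
def altLonely (s : List Char) : List Int → Bool
  | [] => false
  | j :: rest =>
    if (j = 0 ∨ (PySem.List.pyGet? s (j - 1)).getD ' ' ≠ (PySem.List.pyGet? s j).getD ' ') ∧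
       (j = (s.length : Int) - 1 ∨ (PySem.List.pyGet? s (j + 1)).getD ' ' ≠ (PySem.List.pyGet? s j).getD ' ') ∧
       (PySem.List.pyGet? s j).getD ' ' ≠ '_'
    then true else altLonely s rest

-- 'for i in range(1, n-1): if b[i] != b[i-1] and b[i] != b[i+1]: return "NO"'  (the '_' test hoisted out)
def altScan (full : List Char) : List Int → String
  | [] => "YES"
  | i :: rest =>
    if (PySem.List.pyGet? full i).getD ' ' ≠ (PySem.List.pyGet? full (i - 1)).getD ' ' ∧
       (PySem.List.pyGet? full i).getD ' ' ≠ (PySem.List.pyGet? full (i + 1)).getD ' ' then "NO"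
    else altScan full rest

def check_alt (n : Int) (b : String) : String :=
  let s := PySem.List.sorted b.toList (fun x => x) false
  if altLonely s (PySem.List.pyRange 0 (s.length : Int) 1) then "NO"
  else if '_' ∈ b.toList then "YES"
  else altScan b.toList (PySem.List.pyRange 1 (n - 1) 1)

-- ===== PRECONDITION & SPEC =====
-- Pre_check holds exactly where Python's A returns (both A and B raise IndexError on the excluded
-- inputs: underscore-free boards with no early "NO" scanned with n - 1 beyond the board's length).
def Pre_check (n : Int) (b : String) : Prop :=
  n ≤ (b.toList.length : Int) ∨ n ≤ 2 ∨ '_' ∈ b.toList ∨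
  (∃ x ∈ b.toList, b.toList.count x = 1 ∧ x ≠ '_') ∨
  (∃ i ∈ PySem.List.pyRange 1 (min (n - 1) ((b.toList.length : Int) - 1)) 1,
     (PySem.List.pyGet? b.toList i).getD ' ' ≠ (PySem.List.pyGet? b.toList (i - 1)).getD ' ' ∧
     (PySem.List.pyGet? b.toList i).getD ' ' ≠ (PySem.List.pyGet? b.toList (i + 1)).getD ' ') ∨
  (n = (b.toList.length : Int) + 1 ∧ 2 ≤ b.toList.length ∧
     b.toList[b.toList.length - 2]? = b.toList[b.toList.length - 1]?)
instance (n : Int) (b : String) : Decidable (Pre_check n b) := by unfold Pre_check; infer_instance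
def pvWitness_check : Int × String := (4, "aab_")

def Spec_check (n : Int) (b : String) (out : String) : Prop := out = check_alt n b
instance (n : Int) (b : String) (out : String) : Decidable (Spec_check n b out) := by unfold Spec_check; infer_instance

-- ===== CLAIM (what is proved, stated in full; the proofs are below) =====
def Claim_equal_check : Prop := ∀ (n : Int) (b : String), Dom_check n b → Pre_check n b → Spec_check n b (check n b)

-- ===== LEMMAS AND PROOFS =====
theorem checkLoop1_eq (full : List Char) (l : List Char) :
    checkLoop1 full l =
      if ∃ x ∈ l, full.count x = 1 ∧ x ≠ '_' then some "NO" else none := by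
  induction l with
  | nil => simp [checkLoop1]
  | cons x rest ih =>
    by_cases h : full.count x = 1 ∧ x ≠ '_'
    · simp [checkLoop1, h]
    · simp [checkLoop1, h, ih]

theorem altLonely_eq (s : List Char) (l : List Int) :
    altLonely s l =
      decide (∃ j ∈ l,
        (j = 0 ∨ (PySem.List.pyGet? s (j - 1)).getD ' ' ≠ (PySem.List.pyGet? s j).getD ' ') ∧
        (j = (s.length : Int) - 1 ∨ (PySem.List.pyGet? s (j + 1)).getD ' ' ≠ (PySem.List.pyGet? s j).getD ' ') ∧
        (PySem.List.pyGet? s j).getD ' ' ≠ '_') := by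
  induction l with
  | nil => simp [altLonely]
  | cons j rest ih =>
    by_cases h : (j = 0 ∨ (PySem.List.pyGet? s (j - 1)).getD ' ' ≠ (PySem.List.pyGet? s j).getD ' ') ∧
       (j = (s.length : Int) - 1 ∨ (PySem.List.pyGet? s (j + 1)).getD ' ' ≠ (PySem.List.pyGet? s j).getD ' ') ∧
       (PySem.List.pyGet? s j).getD ' ' ≠ '_'
    · simp [altLonely, h]
    · simp [altLonely, h, ih]

theorem checkLoop2_eq (full : List Char) (is : List Int) :
    checkLoop2 full is =
      if full.count '_' = 0 then altScan full is else "YES" := by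
  induction is with
  | nil => simp [checkLoop2, altScan]
  | cons i rest ih =>
    by_cases h0 : full.count '_' = 0
    · by_cases h : (PySem.List.pyGet? full i).getD ' ' ≠ (PySem.List.pyGet? full (i - 1)).getD ' ' ∧
          (PySem.List.pyGet? full i).getD ' ' ≠ (PySem.List.pyGet? full (i + 1)).getD ' '
      · simp [checkLoop2, altScan, h0, h]
      · simp [checkLoop2, altScan, h0, h, ih]
    · simp [checkLoop2, h0, ih]

-- the key fact behind B: in a sorted list, some position whose sorted neighbours both differ and
-- whose element is not '_' exists iff some element other than '_' has count 1
theorem lonely_iff (s : List Char) (hs : s.Pairwise (· ≤ ·)) :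
    (∃ j ∈ PySem.List.pyRange 0 (s.length : Int) 1,
        (j = 0 ∨ (PySem.List.pyGet? s (j - 1)).getD ' ' ≠ (PySem.List.pyGet? s j).getD ' ') ∧
        (j = (s.length : Int) - 1 ∨ (PySem.List.pyGet? s (j + 1)).getD ' ' ≠ (PySem.List.pyGet? s j).getD ' ') ∧
        (PySem.List.pyGet? s j).getD ' ' ≠ '_') ↔
      ∃ x ∈ s, s.count x = 1 ∧ x ≠ '_' := by
  have mono := List.pairwise_iff_getElem.mp hs
  have getNat : ∀ (m : Nat) (hm : m < s.length), (PySem.List.pyGet? s (m : Int)).getD ' ' = s[m] := by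
    intro m hm; simp [pysem, hm]
  constructor
  · rintro ⟨j, hj, hL, hR, hx⟩
    rw [PySem.List.mem_pyRange_one] at hj
    obtain ⟨hj0, hjm⟩ := hj
    lift j to Nat using hj0 with k
    have hk : k < s.length := by exact_mod_cast hjm
    rw [getNat k hk] at hL hR hx
    refine ⟨s[k], List.getElem_mem hk, ?_, hx⟩
    have hpre : ∀ (i : Nat) (hi : i < s.length), i < k → s[i] < s[k] := by
      intro i hi hik
      have hk1 : k - 1 < s.length := by omega
      have hL' : s[k - 1] ≠ s[k] := by
        rcases hL with h0 | hne
        · exact absurd (by exact_mod_cast h0) (by omega : k ≠ 0)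
        · rwa [show (k : Int) - 1 = ((k - 1 : Nat) : Int) by omega, getNat (k - 1) hk1] at hne
      have hlt : s[k - 1] < s[k] := lt_of_le_of_ne (mono _ _ hk1 hk (by omega)) hL'
      rcases Nat.lt_or_ge i (k - 1) with h | h
      · exact lt_of_le_of_lt (mono _ _ hi hk1 h) hlt
      · have : i = k - 1 := by omega
        subst this; exact hlt
    have hsuf : ∀ (i : Nat) (hi : i < s.length), k < i → s[k] < s[i] := by
      intro i hi hik
      have hk1 : k + 1 < s.length := by omega
      have hR' : s[k + 1] ≠ s[k] := by
        rcases hR with h0 | hne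
        · exact absurd (by exact_mod_cast h0) (by omega : (k : Int) ≠ (s.length : Int) - 1)
        · rwa [show (k : Int) + 1 = ((k + 1 : Nat) : Int) by push_cast; ring, getNat (k + 1) hk1] at hne
      have hlt : s[k] < s[k + 1] := lt_of_le_of_ne (mono _ _ hk hk1 (by omega)) (Ne.symm hR')
      rcases Nat.lt_or_ge (k + 1) i with h | h
      · exact lt_of_lt_of_le hlt (mono _ _ hk1 hi h)
      · have : i = k + 1 := by omega
        subst this; exact hlt
    generalize hxv : s[k] = x at *
    have htake : (s.take k).count x = 0 := by
      rw [List.count_eq_zero]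
      intro hmem
      obtain ⟨i, hi, hival⟩ := List.mem_iff_getElem.mp hmem
      have hik : i < k := by simp [List.length_take] at hi; omega
      rw [List.getElem_take] at hival
      exact absurd hival (ne_of_lt (hpre i (by omega) hik))
    have hdrop : (s.drop (k + 1)).count x = 0 := by
      rw [List.count_eq_zero]
      intro hmem
      obtain ⟨i, hi, hival⟩ := List.mem_iff_getElem.mp hmem
      have hilen : k + 1 + i < s.length := by simp [List.length_drop] at hi; omega
      rw [List.getElem_drop] at hival
      exact absurd hival.symm (ne_of_lt (hsuf (k + 1 + i) hilen (by omega)))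
    conv_lhs => rw [← List.take_append_drop k s]
    rw [List.count_append, htake, ← List.getElem_cons_drop hk, hxv, List.count_cons_self, hdrop]
  · rintro ⟨x, hxmem, hc1, hxne⟩
    obtain ⟨k, hk, hkx⟩ := List.mem_iff_getElem.mp hxmem
    refine ⟨(k : Int), PySem.List.mem_pyRange_one.mpr ⟨by omega, by exact_mod_cast hk⟩,
      ?_, ?_, by rw [getNat k hk, hkx]; exact hxne⟩
    · by_cases hk0 : k = 0
      · left; omega
      · right
        have hk1 : k - 1 < s.length := by omega
        rw [getNat k hk, show (k : Int) - 1 = ((k - 1 : Nat) : Int) by omega, getNat (k - 1) hk1]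
        intro heq
        have h1 : s.drop (k - 1) = s[k - 1] :: s.drop k := by
          rw [← List.getElem_cons_drop hk1, show k - 1 + 1 = k by omega]
        have h2 : s.drop k = s[k] :: s.drop (k + 1) := (List.getElem_cons_drop hk).symm
        have hge : 2 ≤ (s.drop (k - 1)).count x := by
          rw [h1, h2, List.count_cons, List.count_cons]
          simp [heq, hkx]
        have hle := (List.drop_sublist (k - 1) s).count_le x
        omega
    · by_cases hklast : k = s.length - 1
      · left; omega
      · right
        have hk1 : k + 1 < s.length := by omega
        rw [getNat k hk, show (k : Int) + 1 = ((k + 1 : Nat) : Int) by push_cast; ring,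
          getNat (k + 1) hk1]
        intro heq
        have h2 : s.drop k = s[k] :: s.drop (k + 1) := (List.getElem_cons_drop hk).symm
        have h3 : s.drop (k + 1) = s[k + 1] :: s.drop (k + 2) :=
          (List.getElem_cons_drop hk1).symm
        have hge : 2 ≤ (s.drop k).count x := by
          rw [h2, h3, List.count_cons, List.count_cons]
          simp [heq, hkx]
        have hle := (List.drop_sublist k s).count_le x
        omega

-- check_alt with its let binding unfolded (definitionally)
theorem check_alt_eq (n : Int) (b : String) :
    check_alt n b =
      (if altLonely (PySem.List.sorted b.toList (fun x => x) false)
          (PySem.List.pyRange 0 ((PySem.List.sorted b.toList (fun x => x) false).length : Int) 1) = true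
       then "NO"
       else if '_' ∈ b.toList then "YES"
       else altScan b.toList (PySem.List.pyRange 1 (n - 1) 1)) := rfl

-- B's sorted-neighbour scan fires exactly when some non-'_' character occurs once in b
theorem altLonely_true_iff (b : String) :
    (altLonely (PySem.List.sorted b.toList (fun x => x) false)
       (PySem.List.pyRange 0 ((PySem.List.sorted b.toList (fun x => x) false).length : Int) 1) = true) ↔
    ∃ x ∈ b.toList, b.toList.count x = 1 ∧ x ≠ '_' := by
  rw [altLonely_eq, decide_eq_true_iff, lonely_iff _ (PySem.List.sorted_pairwise b.toList _)]
  have hperm := PySem.List.sorted_perm b.toList (fun x => x) false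
  constructor
  · rintro ⟨x, hm, hc, hne⟩
    exact ⟨x, hperm.mem_iff.mp hm, by rw [← hperm.count_eq]; exact hc, hne⟩
  · rintro ⟨x, hm, hc, hne⟩
    exact ⟨x, hperm.mem_iff.mpr hm, by rw [hperm.count_eq]; exact hc, hne⟩

-- ===== VERDICT (by name: the statement is the Claim_ definition above) =====
theorem check_spec : Claim_equal_check := by
  intro n b _ _
  unfold Spec_check check
  rw [check_alt_eq, checkLoop1_eq]
  by_cases hx : ∃ x ∈ b.toList, b.toList.count x = 1 ∧ x ≠ '_'
  · rw [if_pos hx]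
    show "NO" = _
    rw [if_pos ((altLonely_true_iff b).mpr hx)]
  · rw [if_neg hx]
    show checkLoop2 b.toList (PySem.List.pyRange 1 (n - 1) 1) = _
    rw [checkLoop2_eq, if_neg (fun h => hx ((altLonely_true_iff b).mp h))]
    by_cases hu : '_' ∈ b.toList
    · rw [if_pos hu, if_neg (by simp [List.count_eq_zero, hu])]
    · rw [if_neg hu, if_pos (List.count_eq_zero.mpr hu)]
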